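-- pv_equiv track=rewrite | github.com/carboncopies/BrainEmulationChallenge | src/models/xor_sc/connectomes.py | find_shapes
-- ===== SOURCE A (Python) =====
-- RPCpath = {
--     'compartment': 'Simulation/Compartments/SC/Create',
--     'neuron': 'Simulation/Neuron/SC/Create',
--     'receptor': 'Simulation/Receptor/Create',
--     'sphere': 'Simulation/Geometry/Sphere/Create',
--     'cylinder': 'Simulation/Geometry/Cylinder/Create',
--     'box': 'Simulation/Geometry/Box/Create',
-- }
--
-- def find_shapes(retrieved_file:list):
--     RPCsphere = RPCpath['sphere']
--     RPCcylinder = RPCpath['cylinder']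
--     RPCbox = RPCpath['box']
--     shapes = []
--     for NESrequest in retrieved_file:
--         if RPCsphere in NESrequest:
--             shapes.append( ('sphere', NESrequest) )
--         elif RPCcylinder in NESrequest:
--             shapes.append( ('cylinder', NESrequest) )
--         elif RPCbox in NESrequest:
--             shapes.append( ('box', NESrequest) )
--     return shapes
-- ===== SOURCE B (Python) =====
-- RPCpath = {
--     'compartment': 'Simulation/Compartments/SC/Create',
--     'neuron': 'Simulation/Neuron/SC/Create',
--     'receptor': 'Simulation/Receptor/Create',
--     'sphere': 'Simulation/Geometry/Sphere/Create',
--     'cylinder': 'Simulation/Geometry/Cylinder/Create',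
--     'box': 'Simulation/Geometry/Box/Create',
-- }
--
-- def find_shapes(retrieved_file: list):
--     # Staged sieve: one pass per shape over the not-yet-claimed requests
--     # (priority = stage order), then restore original request order by index.
--     remaining = list(enumerate(retrieved_file))
--     labeled = []
--     for label in ('sphere', 'cylinder', 'box'):
--         path = RPCpath[label]
--         still = []
--         for i, req in remaining:
--             if path in req:
--                 labeled.append((i, (label, req)))
--             else:
--                 still.append((i, req))
--         remaining = still
--     labeled.sort(key=lambda t: t[0])
--     return [pair for _, pair in labeled]
-- ===== Notes on version B (the rewrite author's own statement) =====
-- stated objective: alternative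
-- what changed: Replaces A's single pass with an if/elif chain by a staged sieve: one pass per shape over the not-yet-claimed enumerated requests (stage order encodes priority), then a stable sort by original index restores request order.
import Mathlib
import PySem

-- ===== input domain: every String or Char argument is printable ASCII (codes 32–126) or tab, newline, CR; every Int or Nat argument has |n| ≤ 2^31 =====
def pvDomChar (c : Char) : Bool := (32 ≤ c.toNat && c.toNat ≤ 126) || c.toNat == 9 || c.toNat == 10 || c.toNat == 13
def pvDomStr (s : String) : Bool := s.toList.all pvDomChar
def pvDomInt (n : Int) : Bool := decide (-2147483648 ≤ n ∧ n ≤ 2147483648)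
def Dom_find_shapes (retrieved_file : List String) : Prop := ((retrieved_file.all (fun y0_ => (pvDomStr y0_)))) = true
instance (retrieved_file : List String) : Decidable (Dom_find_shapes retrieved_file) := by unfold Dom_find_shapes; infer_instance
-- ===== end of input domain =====

-- B replaces A's single pass with its if/elif chain by a staged sieve: one pass per
-- shape over the not-yet-claimed enumerated requests (stage order = priority), then a
-- stable sort by original index; alternative decomposition, same asymptotic cost.

-- ===== PORT A =====
def find_shapes (retrieved_file : List String) : List (String × String) :=
  let RPCsphere := "Simulation/Geometry/Sphere/Create"
  let RPCcylinder := "Simulation/Geometry/Cylinder/Create"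
  let RPCbox := "Simulation/Geometry/Box/Create"
  retrieved_file.foldl (fun shapes NESrequest =>
    if PySem.Str.isIn RPCsphere NESrequest then shapes ++ [("sphere", NESrequest)]
    else if PySem.Str.isIn RPCcylinder NESrequest then shapes ++ [("cylinder", NESrequest)]
    else if PySem.Str.isIn RPCbox NESrequest then shapes ++ [("box", NESrequest)]
    else shapes) []

-- ===== PORT B =====
-- one stage of Source B's sieve: 'for i, req in remaining: …' appending to (labeled, still)
def pvStage (label path : String) (st : List (Int × (String × String)) × List (Int × String)) :
    List (Int × (String × String)) × List (Int × String) :=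
  st.2.foldl (fun acc p =>
    if PySem.Str.isIn path p.2 then (acc.1 ++ [(p.1, (label, p.2))], acc.2)
    else (acc.1, acc.2 ++ [p])) (st.1, [])

def find_shapes_alt (retrieved_file : List String) : List (String × String) :=
  -- 'for label in ('sphere','cylinder','box'): …' over remaining, carried as a pair
  let st := [("sphere", "Simulation/Geometry/Sphere/Create"),
             ("cylinder", "Simulation/Geometry/Cylinder/Create"),
             ("box", "Simulation/Geometry/Box/Create")].foldl
    (fun st lp => pvStage lp.1 lp.2 st)
    (([], PySem.List.enumerate retrieved_file))
  -- labeled.sort(key=lambda t: t[0]); return [pair for _, pair in labeled]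
  (PySem.List.sorted st.1 (fun t => t.1) false).map (fun t => t.2)

-- ===== PRECONDITION & SPEC =====
def Spec_find_shapes (retrieved_file : List String) (out : List (String × String)) : Prop := out = find_shapes_alt retrieved_file
instance (retrieved_file : List String) (out : List (String × String)) : Decidable (Spec_find_shapes retrieved_file out) := by unfold Spec_find_shapes; infer_instance

-- ===== CLAIM (what is proved, stated in full; the proofs are below) =====
def Claim_equal_find_shapes : Prop := ∀ (retrieved_file : List String), Dom_find_shapes retrieved_file → Spec_find_shapes retrieved_file (find_shapes retrieved_file)

-- ===== LEMMAS AND PROOFS =====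

-- abbreviations for the three membership tests (on enumerated pairs)
def pvP1 (p : Int × String) : Bool := PySem.Str.isIn "Simulation/Geometry/Sphere/Create" p.2
def pvP2 (p : Int × String) : Bool := PySem.Str.isIn "Simulation/Geometry/Cylinder/Create" p.2
def pvP3 (p : Int × String) : Bool := PySem.Str.isIn "Simulation/Geometry/Box/Create" p.2

-- A's priority label and the single-pass indexed result M
def pvLab (p : Int × String) : String :=
  if pvP1 p then "sphere" else if pvP2 p then "cylinder" else "box"
def pvTag (p : Int × String) : Int × (String × String) := (p.1, (pvLab p, p.2))
def pvM (e : List (Int × String)) : List (Int × (String × String)) :=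
  (e.filter (fun p => pvP1 p || pvP2 p || pvP3 p)).map pvTag

-- the inner foldl of one sieve stage, with general accumulators
theorem pvStageFold_eq (label path : String) (e : List (Int × String))
    (l : List (Int × (String × String))) (r : List (Int × String)) :
    e.foldl (fun acc p =>
      if PySem.Str.isIn path p.2 then (acc.1 ++ [(p.1, (label, p.2))], acc.2)
      else (acc.1, acc.2 ++ [p])) (l, r) =
      (l ++ (e.filter (fun p => PySem.Str.isIn path p.2)).map (fun p => (p.1, (label, p.2))),
       r ++ e.filter (fun p => !PySem.Str.isIn path p.2)) := by
  induction e generalizing l r with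
  | nil => simp
  | cons x xs ih =>
    simp only [List.foldl_cons, List.filter_cons, PySem.Str.isIn_eq] at *
    by_cases h : PySem.Chars.isIn path.toList x.2.toList <;> simp [h, ih]

-- one sieve stage characterised by filters
theorem pvStage_eq (label path : String) (l : List (Int × (String × String)))
    (e : List (Int × String)) :
    pvStage label path (l, e) =
      (l ++ (e.filter (fun p => PySem.Str.isIn path p.2)).map (fun p => (p.1, (label, p.2))),
       e.filter (fun p => !PySem.Str.isIn path p.2)) := by
  unfold pvStage
  simpa using pvStageFold_eq label path e l []

-- the sieve's labeled list is a permutation of M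
theorem pvSieve_perm (e : List (Int × String)) :
    ((e.filter pvP1).map pvTag ++
     (((e.filter (fun p => !pvP1 p)).filter pvP2).map pvTag ++
      ((((e.filter (fun p => !pvP1 p)).filter (fun p => !pvP2 p)).filter pvP3).map pvTag))).Perm
      (pvM e) := by
  induction e with
  | nil => simp [pvM]
  | cons x xs ih =>
    by_cases h1 : pvP1 x
    · simp [pvM, h1] at ih ⊢
      exact ih
    · by_cases h2 : pvP2 x
      · simp [pvM, h1, h2] at ih ⊢
        exact List.perm_middle.trans (ih.cons (pvTag x))
      · by_cases h3 : pvP3 x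
        · simp [pvM, h1, h2, h3] at ih ⊢
          rw [← List.append_assoc]
          refine List.perm_middle.trans ?_
          rw [List.append_assoc]
          exact ih.cons (pvTag x)
        · simp [pvM, h1, h2, h3] at ih ⊢
          exact ih

-- M has strictly increasing indices
theorem pvM_pairwise (xs : List String) :
    (pvM (PySem.List.enumerate xs)).Pairwise (fun a b => a.1 < b.1) := by
  have h := PySem.List.pairwise_lt_enumerate (xs := xs) (s := 0)
  have h2 := List.Pairwise.sublist (List.filter_sublist (p := fun p => pvP1 p || pvP2 p || pvP3 p)) h
  exact List.pairwise_map.mpr (h2.imp (fun hab => hab))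

-- on each stage's survivors pvTag carries that stage's literal label
theorem pvMaps1 (e : List (Int × String)) :
    (e.filter pvP1).map pvTag = (e.filter pvP1).map (fun p => (p.1, ("sphere", p.2))) :=
  List.map_congr_left (fun p hp => by
    have h := (List.mem_filter.mp hp).2
    simp [pvTag, pvLab, h])

theorem pvMaps2 (e : List (Int × String)) :
    ((e.filter (fun p => !pvP1 p)).filter pvP2).map pvTag
      = ((e.filter (fun p => !pvP1 p)).filter pvP2).map (fun p => (p.1, ("cylinder", p.2))) :=
  List.map_congr_left (fun p hp => by
    have h2 := (List.mem_filter.mp hp).2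
    have h1 := (List.mem_filter.mp (List.mem_filter.mp hp).1).2
    simp only [Bool.not_eq_true'] at h1
    simp [pvTag, pvLab, h1, h2])

theorem pvMaps3 (e : List (Int × String)) :
    (((e.filter (fun p => !pvP1 p)).filter (fun p => !pvP2 p)).filter pvP3).map pvTag
      = (((e.filter (fun p => !pvP1 p)).filter (fun p => !pvP2 p)).filter pvP3).map
          (fun p => (p.1, ("box", p.2))) :=
  List.map_congr_left (fun p hp => by
    have h3 := (List.mem_filter.mp hp).2
    have h2 := (List.mem_filter.mp (List.mem_filter.mp hp).1).2
    have h1 := (List.mem_filter.mp (List.mem_filter.mp (List.mem_filter.mp hp).1).1).2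
    simp only [Bool.not_eq_true'] at h1 h2
    simp [pvTag, pvLab, h1, h2])

-- A equals M with indices dropped
theorem pvA_eq_M (xs : List String) (s : Int) (acc : List (String × String)) :
    xs.foldl (fun shapes NESrequest =>
      if PySem.Str.isIn "Simulation/Geometry/Sphere/Create" NESrequest then shapes ++ [("sphere", NESrequest)]
      else if PySem.Str.isIn "Simulation/Geometry/Cylinder/Create" NESrequest then shapes ++ [("cylinder", NESrequest)]
      else if PySem.Str.isIn "Simulation/Geometry/Box/Create" NESrequest then shapes ++ [("box", NESrequest)]
      else shapes) acc
    = acc ++ (pvM (PySem.List.enumerate xs s)).map (fun t => t.2) := by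
  induction xs generalizing s acc with
  | nil => simp [pvM, PySem.List.enumerate_nil]
  | cons x rest ih =>
    rw [PySem.List.enumerate_cons, List.foldl_cons]
    by_cases h1 : pvP1 (s, x)
    · rw [if_pos (show PySem.Str.isIn "Simulation/Geometry/Sphere/Create" x = true from h1),
        ih (s + 1)]
      simp [pvM, pvTag, pvLab, h1]
    · rw [if_neg (show ¬ PySem.Str.isIn "Simulation/Geometry/Sphere/Create" x = true from h1)]
      by_cases h2 : pvP2 (s, x)
      · rw [if_pos (show PySem.Str.isIn "Simulation/Geometry/Cylinder/Create" x = true from h2),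
          ih (s + 1)]
        simp [pvM, pvTag, pvLab, h1, h2]
      · rw [if_neg (show ¬ PySem.Str.isIn "Simulation/Geometry/Cylinder/Create" x = true from h2)]
        by_cases h3 : pvP3 (s, x)
        · rw [if_pos (show PySem.Str.isIn "Simulation/Geometry/Box/Create" x = true from h3),
            ih (s + 1)]
          simp [pvM, pvTag, pvLab, h1, h2, h3]
        · rw [if_neg (show ¬ PySem.Str.isIn "Simulation/Geometry/Box/Create" x = true from h3),
            ih (s + 1)]
          simp [pvM, h1, h2, h3]

-- ===== VERDICT (by name: the statement is the Claim_ definition above) =====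
theorem find_shapes_spec : Claim_equal_find_shapes := by
  intro rf _
  unfold Spec_find_shapes find_shapes find_shapes_alt
  simp only [List.foldl_cons, List.foldl_nil, pvStage_eq, List.nil_append]
  rw [pvA_eq_M rf 0 []]
  simp only [List.nil_append]
  have hs := PySem.List.sorted_eq_of_perm_of_pairwise_lt _ _
    (fun t : Int × (String × String) => t.1)
    ((pvSieve_perm (PySem.List.enumerate rf 0)).symm) (pvM_pairwise rf)
  rw [pvMaps1, pvMaps2, pvMaps3] at hs
  simp only [pvP1, pvP2] at hs
  rw [← hs]
  unfold pvP1 pvP2 pvP3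
  simp only [List.append_assoc]
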